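-- pv_equiv track=rewrite | github.com/mizm/TIL | python/swexpert/sw1979.py | chkcnt
-- ===== SOURCE A (Python) =====
-- def chkcnt(l,n):
--     b = 0
--     c = 0
--     for i in l:
--         if i == 1:
--             b += 1
--         else:
--             if b == n :
--                 c += 1
--             b = 0
--     if b == n :
--         c += 1
--     return c
-- ===== SOURCE B (Python) =====
-- def chkcnt(l, n):
--     s = ''.join('1' if i == 1 else '0' for i in l)
--     return sum(1 for part in s.split('0') if len(part) == n)
-- ===== Notes on version B (the rewrite author's own statement) =====
-- stated objective: idiomatic
-- what changed: Replaces the explicit run-length counter loop (with its duplicated end-of-list check) by encoding the list as a 0/1 string and counting the parts of s.split('0') whose length is n; split's empty-part semantics reproduces the boundary cases with no special-casing.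
import Mathlib
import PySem

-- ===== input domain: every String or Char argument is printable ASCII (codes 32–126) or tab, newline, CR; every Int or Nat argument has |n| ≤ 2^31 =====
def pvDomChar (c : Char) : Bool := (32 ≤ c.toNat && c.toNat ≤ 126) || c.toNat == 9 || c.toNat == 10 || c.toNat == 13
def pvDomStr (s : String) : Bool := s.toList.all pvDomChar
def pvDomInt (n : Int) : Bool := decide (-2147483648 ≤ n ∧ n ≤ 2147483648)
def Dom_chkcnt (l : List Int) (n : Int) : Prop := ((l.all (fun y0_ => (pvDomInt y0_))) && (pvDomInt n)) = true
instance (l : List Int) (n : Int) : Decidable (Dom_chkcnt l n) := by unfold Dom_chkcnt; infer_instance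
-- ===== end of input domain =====

-- B replaces A's running-counter loop by encoding the list as a 0/1 string and counting
-- the parts of split('0') of length n (objective: idiomatic; same O(len l) cost).

-- ===== PORT A =====
def chkcnt (l : List Int) (n : Int) : Int :=
  let r := l.foldl
    (fun (bc : Int × Int) i =>
      if i == 1 then (bc.1 + 1, bc.2)
      else (0, if bc.1 == n then bc.2 + 1 else bc.2))
    (0, 0)
  if r.1 == n then r.2 + 1 else r.2

-- ===== PORT B =====
-- Python strings are modelled as List Char (PySem.Chars is exact on these '0'/'1' ASCII
-- strings): ''.join → Chars.join [], s.split('0') → Chars.splitOn s ['0'], len → List.length.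
def chkcnt_alt (l : List Int) (n : Int) : Int :=
  let s : List Char := PySem.Chars.join [] (l.map (fun i => if i == 1 then ['1'] else ['0']))
  (((PySem.Chars.splitOn s ['0']).filter (fun part => (part.length : Int) == n)).length : Int)

-- ===== PRECONDITION & SPEC =====
def Spec_chkcnt (l : List Int) (n : Int) (out : Int) : Prop := out = chkcnt_alt l n
instance (l : List Int) (n : Int) (out : Int) : Decidable (Spec_chkcnt l n out) := by unfold Spec_chkcnt; infer_instance

-- ===== CLAIM (what is proved, stated in full; the proofs are below) =====
def Claim_equal_chkcnt : Prop := ∀ (l : List Int) (n : Int), Dom_chkcnt l n → Spec_chkcnt l n (chkcnt l n)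

-- ===== LEMMAS AND PROOFS =====

-- count of the runs of exactly n ones in l, given a current run of length b already read
def pvRuns (n : Int) : List Int → Int → Int
  | [], b => if b == n then 1 else 0
  | i :: l, b => if i == 1 then pvRuns n l (b + 1) else (if b == n then 1 else 0) + pvRuns n l 0

-- A's loop state (b, c) computes c + pvRuns
theorem pvA_loop (n : Int) (l : List Int) : ∀ (b c : Int),
    (if (l.foldl
          (fun (bc : Int × Int) i =>
            if i == 1 then (bc.1 + 1, bc.2)
            else (0, if bc.1 == n then bc.2 + 1 else bc.2)) (b, c)).1 == n
     then (l.foldl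
          (fun (bc : Int × Int) i =>
            if i == 1 then (bc.1 + 1, bc.2)
            else (0, if bc.1 == n then bc.2 + 1 else bc.2)) (b, c)).2 + 1
     else (l.foldl
          (fun (bc : Int × Int) i =>
            if i == 1 then (bc.1 + 1, bc.2)
            else (0, if bc.1 == n then bc.2 + 1 else bc.2)) (b, c)).2) = c + pvRuns n l b := by
  induction l with
  | nil =>
    intro b c
    simp only [List.foldl_nil, pvRuns]
    split_ifs <;> ring
  | cons i l ih =>
    intro b c
    by_cases hi : (i == 1) = true
    · rw [show pvRuns n (i :: l) b = pvRuns n l (b + 1) by simp [pvRuns, hi]]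
      simpa only [List.foldl_cons, hi, if_true] using ih (b + 1) c
    · by_cases hb : (b == n) = true
      · rw [show pvRuns n (i :: l) b = 1 + pvRuns n l 0 by simp [pvRuns, hi, hb]]
        have h := ih 0 (c + 1)
        simp only [List.foldl_cons, hi, if_false, hb, if_true, Bool.false_eq_true] at h ⊢
        rw [h]; try ring
      · rw [show pvRuns n (i :: l) b = pvRuns n l 0 by simp [pvRuns, hi, hb]]
        have h := ih 0 c
        simp only [List.foldl_cons, hi, if_false, hb, Bool.false_eq_true] at h ⊢
        rw [h]; try ring

-- splitOn.go on a 0/1 string counts parts of length n like pvRuns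
theorem pvB_go (n : Int) (l : List Int) : ∀ (fuel : Nat) (cur : List Char) (acc : List (List Char)),
    l.length < fuel →
    (((PySem.Chars.splitOn.go ['0'] fuel (l.map (fun i => if i == 1 then '1' else '0')) cur acc).filter
        (fun part => (part.length : Int) == n)).length : Int)
      = ((acc.filter (fun part => (part.length : Int) == n)).length : Int)
        + pvRuns n l (cur.length : Int) := by
  induction l with
  | nil =>
    intro fuel cur acc hf
    match fuel, hf with
    | fuel + 1, _ =>
      simp [PySem.Chars.splitOn.go, pvRuns, List.filter_reverse, List.filter_cons]
      split_ifs <;> simp_all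
  | cons i l ih =>
    intro fuel cur acc hf
    match fuel, hf with
    | fuel + 1, hf =>
      have hl : l.length < fuel := by simpa using Nat.lt_of_succ_lt_succ hf
      by_cases hi : (i == 1) = true
      · have hi' : i = 1 := by simpa using hi
        rw [show pvRuns n (i :: l) (cur.length : Int) = pvRuns n l ((cur.length : Int) + 1)
            by simp [pvRuns, hi]]
        have h := ih fuel ('1' :: cur) acc hl
        simp only [List.length_cons] at h
        push_cast at h ⊢
        rw [← h]
        congr 1
        simp [PySem.Chars.splitOn.go, hi', List.isPrefixOf]
      · have hi' : ¬ i = 1 := by simpa using hi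
        rw [show pvRuns n (i :: l) (cur.length : Int)
            = (if ((cur.length : Int) == n) = true then 1 else 0) + pvRuns n l 0
            by simp [pvRuns, hi]]
        have h := ih fuel [] (cur.reverse :: acc) hl
        simp only [List.length_nil, Nat.cast_zero, List.filter_cons, List.length_reverse] at h
        rw [show PySem.Chars.splitOn.go ['0'] (fuel + 1) ((i :: l).map (fun i => if i == 1 then '1' else '0')) cur acc
            = PySem.Chars.splitOn.go ['0'] fuel (l.map (fun i => if i == 1 then '1' else '0')) [] (cur.reverse :: acc)
            by simp [PySem.Chars.splitOn.go, hi', List.isPrefixOf]]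
        rw [h]
        split_ifs <;> (try simp only [List.length_cons]) <;> (try push_cast) <;> ring

-- intercalating with the empty separator is flatten
theorem pvInter (xss : List (List Char)) :
    (List.intersperse ([] : List Char) xss).flatten = xss.flatten := by
  induction xss with
  | nil => simp
  | cons a xss ih =>
    cases xss with
    | nil => simp
    | cons b yss => simp_all [List.intersperse_cons₂]

-- ''.join of the singleton strings is the character map
theorem pvJoin (l : List Int) :
    PySem.Chars.join [] (l.map (fun i => if i == 1 then ['1'] else ['0']))
      = l.map (fun i => if i == 1 then '1' else '0') := by
  simp only [PySem.Chars.join, List.intercalate, pvInter]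
  induction l with
  | nil => simp
  | cons i l ih =>
    by_cases hi : i = 1 <;> simp_all

-- ===== VERDICT (by name: the statement is the Claim_ definition above) =====
theorem chkcnt_spec : Claim_equal_chkcnt := by
  intro l n _
  unfold Spec_chkcnt chkcnt chkcnt_alt
  rw [pvJoin]
  simp only [PySem.Chars.splitOn]
  rw [pvB_go n l (l.map (fun i => if i == 1 then '1' else '0')).length.succ [] []
      (by simp)]
  simpa using pvA_loop n l 0 0
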